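-- pv_equiv track=rewrite | github.com/Lorenzoanzivino/Its_Esercizi | 6_code_dragons/codici_code_dragons.py | max_or_none
-- ===== SOURCE A (Python) =====
-- def max_or_none(nums: list[int]) -> int | None:
--     if nums == []:
--         return None
--     valoreMassimo:int = nums[0]
--     for numeri in nums:
--         if numeri > valoreMassimo:
--             valoreMassimo = numeri
--     return valoreMassimo
-- ===== SOURCE B (Python) =====
-- def max_or_none(nums: list[int]) -> int | None:
--     return sorted(nums)[-1] if nums else None
-- ===== Notes on version B (the rewrite author's own statement) =====
-- stated objective: alternative
-- what changed: replaces A's running-maximum scan with a guard plus sort-ascending-and-take-last-element one-liner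
import Mathlib
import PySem

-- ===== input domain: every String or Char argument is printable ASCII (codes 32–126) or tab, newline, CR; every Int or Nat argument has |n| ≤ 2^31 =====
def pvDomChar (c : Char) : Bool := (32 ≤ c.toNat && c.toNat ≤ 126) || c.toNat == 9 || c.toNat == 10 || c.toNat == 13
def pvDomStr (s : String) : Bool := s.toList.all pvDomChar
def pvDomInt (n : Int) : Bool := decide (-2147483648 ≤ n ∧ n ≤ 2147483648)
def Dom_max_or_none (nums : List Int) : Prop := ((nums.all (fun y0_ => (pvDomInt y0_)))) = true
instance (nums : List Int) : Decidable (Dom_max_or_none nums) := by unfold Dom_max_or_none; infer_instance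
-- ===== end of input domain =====

-- B replaces A's running-maximum scan with guard + sorted(nums)[-1]; alternative decomposition, same results.
-- ===== PORT A =====
def max_or_none (nums : List Int) : Option Int :=
  match nums with
  | [] => none
  | h :: _ => some (nums.foldl (fun valoreMassimo numeri => if numeri > valoreMassimo then numeri else valoreMassimo) h)

-- ===== PORT B =====
def max_or_none_alt (nums : List Int) : Option Int :=
  if nums = [] then none
  else PySem.List.pyGet? (PySem.List.sorted nums (fun x => x) false) (-1)

-- ===== PRECONDITION & SPEC =====
def Spec_max_or_none (nums : List Int) (out : Option Int) : Prop := out = max_or_none_alt nums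
instance (nums : List Int) (out : Option Int) : Decidable (Spec_max_or_none nums out) := by unfold Spec_max_or_none; infer_instance

-- ===== CLAIM (what is proved, stated in full; the proofs are below) =====
def Claim_equal_max_or_none : Prop := ∀ (nums : List Int), Dom_max_or_none nums → Spec_max_or_none nums (max_or_none nums)

-- ===== LEMMAS AND PROOFS =====

-- ===== VERDICT (by name: the statement is the Claim_ definition above) =====
lemma pvStep_eq_max (m x : Int) : (if x > m then x else m) = max m x := by omega

lemma pvFoldlMax_mem (xs : List Int) (m : Int) : xs.foldl max m = m ∨ xs.foldl max m ∈ xs := by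
  induction xs generalizing m with
  | nil => left; rfl
  | cons a t ih =>
    simp only [List.foldl_cons]
    rcases ih (max m a) with h | h
    · rcases max_choice m a with hm | hm
      · left; rw [h, hm]
      · right; rw [h, hm]; exact List.mem_cons_self
    · right; exact List.mem_cons_of_mem _ h

lemma pvLe_foldlMax (xs : List Int) (m : Int) (y : Int) (hy : y ≤ m ∨ y ∈ xs) :
    y ≤ xs.foldl max m := by
  induction xs generalizing m with
  | nil =>
    rcases hy with h | h
    · simpa using h
    · cases h
  | cons a t ih =>
    simp only [List.foldl_cons]
    rcases hy with h | h
    · exact ih (max m a) (Or.inl (by omega))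
    · rcases List.mem_cons.mp h with h | h
      · exact ih (max m a) (Or.inl (by omega))
      · exact ih (max m a) (Or.inr h)

lemma pvLast_ge_of_pairwise (l : List Int) (hp : l.Pairwise (· ≤ ·)) (m : Int)
    (hl : l.getLast? = some m) : ∀ y ∈ l, y ≤ m := by
  induction l with
  | nil => simp at hl
  | cons a t ih =>
    intro y hy
    cases t with
    | nil =>
      simp at hl hy; omega
    | cons b u =>
      have hl' : (b :: u).getLast? = some m := by
        simpa [List.getLast?_cons_cons] using hl
      have hp' := (List.pairwise_cons.mp hp)
      have hmem : m ∈ b :: u := List.mem_of_getLast? hl'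
      rcases List.mem_cons.mp hy with h | h
      · exact h ▸ le_trans (hp'.1 m hmem) le_rfl
      · exact ih hp'.2 hl' y h

theorem max_or_none_spec : Claim_equal_max_or_none := by
  intro nums _
  unfold Spec_max_or_none max_or_none max_or_none_alt
  cases nums with
  | nil => rfl
  | cons h t =>
    simp only [if_neg (by simp : (h :: t) ≠ [])]
    rw [PySem.List.pyGet?_neg_one]
    set s := PySem.List.sorted (h :: t) (fun x => x) false with hs
    have hsne : s ≠ [] := by
      intro he
      exact (List.cons_ne_nil h t) ((PySem.List.sorted_eq_nil_iff _ _ _).mp he)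
    obtain ⟨m, hm⟩ := Option.ne_none_iff_exists'.mp (mt List.getLast?_eq_none_iff.mp hsne)
    rw [hm]
    simp only [funext fun m => funext fun x => pvStep_eq_max m x]
    have hperm : s.Perm (h :: t) := PySem.List.sorted_perm ..
    have hpair : s.Pairwise (· ≤ ·) := by
      have := PySem.List.sorted_pairwise (xs := h :: t) (key := fun x : Int => x)
      simpa using this
    have hmmem : m ∈ h :: t := hperm.mem_iff.mp (List.mem_of_getLast? hm)
    have hrmem : (h :: t).foldl max h = h ∨ (h :: t).foldl max h ∈ (h :: t) :=
      pvFoldlMax_mem _ _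
    have hr_in : (h :: t).foldl max h ∈ (h :: t) := by
      rcases hrmem with he | he
      · rw [he]; exact List.mem_cons_self
      · exact he
    have h1 : (h :: t).foldl max h ≤ m :=
      pvLast_ge_of_pairwise s hpair m hm _ (hperm.mem_iff.mpr hr_in)
    have h2 : m ≤ (h :: t).foldl max h :=
      pvLe_foldlMax (h :: t) h m (Or.inr hmmem)
    exact congrArg some (le_antisymm h1 h2)
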